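-- pv_equiv track=rewrite | github.com/Krissuper11/Python | KT/kt1/exam.py | list_move
-- ===== SOURCE A (Python) =====
-- def list_move(initial_list: list, amount: int, factor: int) -> list:
--     """
--     Create amount lists where elements are shifted right by factor.
--
--     This function creates a list with amount of lists inside it.
--     In each sublist, elements are shifted right by factor elements.
--     factor >= 0
--
--     list_move(["a", "b", "c"], 3, 0) => [['a', 'b', 'c'], ['a', 'b', 'c'], ['a', 'b', 'c']]
--     list_move(["a", "b", "c"], 3, 1) => [['a', 'b', 'c'], ['c', 'a', 'b'], ['b', 'c', 'a']]
--     list_move([1, 2, 3], 3, 2) => [[1, 2, 3], [2, 3, 1], [3, 1, 2]]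
--     list_move([1, 2, 3], 4, 1) => [[1, 2, 3], [3, 1, 2], [2, 3, 1], [1, 2, 3]]
--     list_move([], 3, 4) => [[], [], [], []]
--     """
--     final_list = []
--     if len(initial_list) == 0:
--         for i in range(amount):
--             final_list.append([])
--         return final_list
--     for i in range(amount):
--         factor %= len(initial_list)
--         factor1 = factor * -1
--         shift_list = []
--         if i == 0:
--             for element in initial_list:
--                 shift_list.append(element)
--         else:
--             for u in range(len(final_list[i - 1])):
--                 try:
--                     shift_list.append(final_list[i - 1][factor1])
--                 except IndexError:
--                     factor -= len(initial_list)
--                     shift_list.append(final_list[i - 1][factor1])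
--                 factor1 += 1
--         final_list.append(shift_list)
--     return final_list
-- ===== SOURCE B (Python) =====
-- def list_move(initial_list: list, amount: int, factor: int) -> list:
--     """Each rotation is derived directly from the original list by slicing at
--     k = (i*factor) % n, instead of rotating the previous sublist element-wise."""
--     n = len(initial_list)
--     if n == 0:
--         return [[] for _ in range(amount)]
--     final_list = []
--     for i in range(amount):
--         k = (i * factor) % n
--         final_list.append(initial_list[n - k:] + initial_list[:n - k])
--     return final_list
-- ===== Notes on version B (the rewrite author's own statement) =====
-- stated objective: simpler
-- what changed: B computes each rotated sublist directly from the original list by slicing at k=(i*factor)%n, replacing A's element-by-element rotation of the previous sublist with its try/except on negative indices and mutated factor state.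
import Mathlib
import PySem

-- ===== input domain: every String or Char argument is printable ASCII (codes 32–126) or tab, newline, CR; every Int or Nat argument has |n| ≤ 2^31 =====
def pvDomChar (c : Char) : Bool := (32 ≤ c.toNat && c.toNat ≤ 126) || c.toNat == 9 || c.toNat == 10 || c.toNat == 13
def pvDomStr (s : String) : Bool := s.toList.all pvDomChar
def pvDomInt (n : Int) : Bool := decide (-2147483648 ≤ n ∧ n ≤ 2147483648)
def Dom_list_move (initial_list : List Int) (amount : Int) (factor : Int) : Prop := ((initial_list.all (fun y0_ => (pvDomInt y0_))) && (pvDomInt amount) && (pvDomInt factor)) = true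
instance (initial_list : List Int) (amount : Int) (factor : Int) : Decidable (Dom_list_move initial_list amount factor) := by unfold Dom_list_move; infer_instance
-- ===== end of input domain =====

-- B derives every rotation directly from the original list by modular slicing instead of
-- rotating the previous sublist element-by-element (objective: simpler).

-- ===== PORT A =====
-- inner loop body of A ('for u in range(len(final_list[i-1])): try … except IndexError …');
-- state = (shift_list, factor, factor1).  The except-branch re-indexes with the SAME factor1,
-- which in Python would re-raise; '.getD 0' stands for that re-raised access (the branch is
-- unreachable: factor1 always stays in [-len, len)).
def lmInner (lenInit : Int) (prev : List Int) (t : List Int × Int × Int) : List Int × Int × Int :=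
  match PySem.List.pyGet? prev t.2.2 with
  | some v => (t.1 ++ [v], t.2.1, t.2.2 + 1)
  | none => (t.1 ++ [(PySem.List.pyGet? prev t.2.2).getD 0], t.2.1 - lenInit, t.2.2 + 1)

-- outer loop body of A ('for i in range(amount)'); state = (final_list, factor)
def lmOuter (initial_list : List Int) (st : List (List Int) × Int) (i : Int) : List (List Int) × Int :=
  let f := PySem.Int.mod st.2 (initial_list.length : Int)
  let r :=
    if i == 0 then
      (initial_list.foldl (fun s e => s ++ [e]) [], f)
    else
      let prev := (PySem.List.pyGet? st.1 (i - 1)).getD []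
      let q := (List.range prev.length).foldl
        (fun t _ => lmInner (initial_list.length : Int) prev t) ([], f, f * (-1))
      (q.1, q.2.1)
  (st.1 ++ [r.1], r.2)

def list_move (initial_list : List Int) (amount : Int) (factor : Int) : List (List Int) :=
  if (initial_list.length : Int) == 0 then
    (PySem.List.pyRange 0 amount 1).foldl (fun fl _ => fl ++ [([] : List Int)]) []
  else
    ((PySem.List.pyRange 0 amount 1).foldl (lmOuter initial_list) ([], factor)).1

-- ===== PORT B =====
def list_move_alt (initial_list : List Int) (amount : Int) (factor : Int) : List (List Int) :=
  let n := (initial_list.length : Int)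
  if n == 0 then
    (PySem.List.pyRange 0 amount 1).map (fun _ => [])
  else
    (PySem.List.pyRange 0 amount 1).map (fun i =>
      let k := PySem.Int.mod (i * factor) n
      PySem.List.slice initial_list (some (n - k)) none ++
        PySem.List.slice initial_list none (some (n - k)))

-- ===== PRECONDITION & SPEC =====
def Spec_list_move (initial_list : List Int) (amount : Int) (factor : Int) (out : List (List Int)) : Prop := out = list_move_alt initial_list amount factor
instance (initial_list : List Int) (amount : Int) (factor : Int) (out : List (List Int)) : Decidable (Spec_list_move initial_list amount factor out) := by unfold Spec_list_move; infer_instance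

-- ===== CLAIM (what is proved, stated in full; the proofs are below) =====
def Claim_equal_list_move : Prop := ∀ (initial_list : List Int) (amount : Int) (factor : Int), Dom_list_move initial_list amount factor → Spec_list_move initial_list amount factor (list_move initial_list amount factor)

-- ===== LEMMAS AND PROOFS =====

-- the inner loop over nonnegative indices copies a contiguous segment
theorem lm_iter_nonneg (prev : List Int) (L : Int) :
    ∀ (m : Nat) (s : List Int) (f t : Int), 0 ≤ t → t + m ≤ prev.length →
    (List.range m).foldl (fun t _ => lmInner L prev t) (s, f, t)
      = (s ++ (prev.drop t.toNat).take m, f, t + m) := by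
  intro m
  induction m with
  | zero => intro s f t _ _; simp
  | succ m ih =>
    intro s f t ht hm
    have hlt : t.toNat < prev.length := by omega
    rw [List.range_succ_eq_map, List.foldl_cons, List.foldl_map]
    have hget : PySem.List.pyGet? prev t = some prev[t.toNat] :=
      PySem.List.pyGet?_eq_some_getElem prev ht (by omega)
    have hstep : lmInner L prev (s, f, t) = (s ++ [prev[t.toNat]], f, t + 1) := by
      simp [lmInner, hget]
    rw [hstep, ih _ f (t + 1) (by omega) (by omega)]
    have hdrop : prev.drop t.toNat = prev[t.toNat] :: prev.drop (t.toNat + 1) :=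
      List.drop_eq_getElem_cons hlt
    have h3 : (t + 1).toNat = t.toNat + 1 := by omega
    have h4 : t + 1 + (m : Int) = t + ((m : Nat) + 1 : Nat) := by push_cast; ring
    rw [h3, hdrop, List.take_succ_cons, h4]
    simp

-- the inner loop over negative indices copies a segment from the end
theorem lm_iter_neg (prev : List Int) (L : Int) :
    ∀ (m : Nat) (s : List Int) (f t : Int), -(prev.length : Int) ≤ t → t + m ≤ 0 →
    (List.range m).foldl (fun t _ => lmInner L prev t) (s, f, t)
      = (s ++ (prev.drop ((prev.length : Int) + t).toNat).take m, f, t + m) := by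
  intro m
  induction m with
  | zero => intro s f t _ _; simp
  | succ m ih =>
    intro s f t ht hm
    have htneg : t < 0 := by omega
    have hk : 0 < (-t).toNat ∧ (-t).toNat ≤ prev.length := by omega
    have hidx : ((prev.length : Int) + t).toNat < prev.length := by omega
    have hget : PySem.List.pyGet? prev t = some prev[((prev.length : Int) + t).toNat] := by
      have h1 := PySem.List.pyGet?_neg_natCast prev (-t).toNat hk.1 hk.2
      rw [show -(((-t).toNat : Nat) : Int) = t from by omega] at h1
      rw [h1, show prev.length - (-t).toNat = ((prev.length : Int) + t).toNat from by omega,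
        List.getElem?_eq_getElem hidx]
    have hstep : lmInner L prev (s, f, t) = (s ++ [prev[((prev.length : Int) + t).toNat]], f, t + 1) := by
      simp [lmInner, hget]
    rw [List.range_succ_eq_map, List.foldl_cons, List.foldl_map, hstep,
        ih _ f (t + 1) (by omega) (by omega)]
    have hdrop : prev.drop ((prev.length : Int) + t).toNat
        = prev[((prev.length : Int) + t).toNat] :: prev.drop (((prev.length : Int) + t).toNat + 1) :=
      List.drop_eq_getElem_cons hidx
    have h3 : ((prev.length : Int) + (t + 1)).toNat = ((prev.length : Int) + t).toNat + 1 := by omega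
    have h4 : t + 1 + (m : Int) = t + ((m : Nat) + 1 : Nat) := by push_cast; ring
    rw [h3, hdrop, List.take_succ_cons, h4]
    simp

-- the full inner loop is a right-rotation by f (stated as left-rotation by len - f)
theorem lm_inner_total (prev : List Int) (L f : Int)
    (hf0 : 0 ≤ f) (hfn : f < (prev.length : Int)) :
    (List.range prev.length).foldl (fun t _ => lmInner L prev t) ([], f, f * (-1))
      = (prev.rotate (prev.length - f.toNat), f, (prev.length : Int) - f) := by
  have hsplit : prev.length = f.toNat + (prev.length - f.toNat) := by omega
  rw [show (List.range prev.length) = List.range (f.toNat + (prev.length - f.toNat)) from by rw [← hsplit],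
      List.range_add, List.foldl_append, List.foldl_map]
  have h1 := lm_iter_neg prev L f.toNat [] f (f * (-1)) (by omega) (by omega)
  rw [h1]
  have he : ((prev.length : Int) + f * (-1)).toNat = prev.length - f.toNat := by omega
  rw [he]
  have hlen : (prev.drop (prev.length - f.toNat)).length = f.toNat := by
    simp; omega
  rw [List.take_of_length_le (le_of_eq hlen), show f * (-1) + (f.toNat : Int) = 0 from by omega]
  simp only [List.nil_append]
  have h2 := lm_iter_nonneg prev L (prev.length - f.toNat)
      (prev.drop (prev.length - f.toNat)) f 0 (by omega) (by omega)
  rw [h2]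
  simp [List.rotate_eq_drop_append_take (show prev.length - f.toNat ≤ prev.length from by omega)]
  omega

-- invariant of A's outer loop when the list is nonempty
theorem lm_outer_inv (initial_list : List Int) (f0 : Int) (hn : initial_list ≠ []) :
    ∀ (m : Nat), 1 ≤ m →
    (PySem.List.pyRange 0 m 1).foldl (lmOuter initial_list) ([], f0)
      = ((List.range m).map (fun j =>
            initial_list.rotate (j * (initial_list.length - (PySem.Int.mod f0 (initial_list.length : Int)).toNat))),
         PySem.Int.mod f0 (initial_list.length : Int)) := by
  have hnpos : 0 < initial_list.length := List.length_pos_iff.mpr hn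
  set n := initial_list.length with hn_def
  set f := PySem.Int.mod f0 (n : Int) with hf_def
  have hf0 : 0 ≤ f := PySem.Int.mod_nonneg f0 (by exact_mod_cast hnpos)
  have hfn : f < (n : Int) := PySem.Int.mod_lt f0 (by exact_mod_cast hnpos)
  have hff : PySem.Int.mod f (n : Int) = f := by
    rw [PySem.Int.mod_eq_emod_of_pos (show (0:Int) < (n:Int) by exact_mod_cast hnpos)]
    exact Int.emod_eq_of_lt hf0 hfn
  set d := n - f.toNat with hd_def
  intro m
  induction m with
  | zero => omega
  | succ m ih =>
    intro _
    by_cases hm1 : m = 0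
    · subst hm1
      rw [show (((0+1:Nat)) : Int) = 1 from by norm_num,
          show PySem.List.pyRange 0 1 1 = [0] from by decide]
      simp only [List.foldl_cons, List.foldl_nil, lmOuter]
      rw [PySem.List.foldl_append_singleton]
      simp
      rw [← hn_def]
    · have hm : 1 ≤ m := by omega
      rw [show ((m+1:Nat) : Int) = (m : Int) + 1 from by push_cast; ring,
          PySem.List.pyRange_one_succ_right (show (0:Int) ≤ (m:Int) by positivity),
          List.foldl_append, ih hm]
      simp only [List.foldl_cons, List.foldl_nil, lmOuter]
      have hmne : ((m : Int) == 0) = false := by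
        simp; omega
      rw [hmne]
      simp only [Bool.false_eq_true, if_false]
      rw [← hn_def, hff]
      -- the previous sublist
      have hm1' : (m : Int) - 1 = ((m - 1 : Nat) : Int) := by omega
      have hprev : (PySem.List.pyGet? ((List.range m).map
            (fun j => initial_list.rotate (j * d))) ((m : Int) - 1)).getD []
          = initial_list.rotate ((m - 1) * d) := by
        rw [hm1', PySem.List.pyGet?_natCast]
        rw [List.getElem?_map, List.getElem?_range (by omega)]
        simp
      rw [hprev]
      have hlenprev : (initial_list.rotate ((m - 1) * d)).length = n := by
        simp [hn_def]
      have hinner := lm_inner_total (initial_list.rotate ((m - 1) * d)) (n : Int) f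
        hf0 (by rw [hlenprev]; exact hfn)
      rw [hlenprev] at hinner
      rw [hlenprev, hinner]
      simp only [List.rotate_rotate]
      have harg : (m - 1) * d + (n - f.toNat) = m * d := by
        obtain ⟨m', rfl⟩ : ∃ m', m = m' + 1 := ⟨m - 1, by omega⟩
        simp [Nat.succ_mul, hd_def]
      rw [harg, List.range_succ]
      simp

-- pointwise: B's slice pair equals the rotation A produces
theorem lm_pointwise (initial_list : List Int) (f0 : Int) (hn : initial_list ≠ []) (j : Nat) :
    (PySem.List.slice initial_list
        (some ((initial_list.length : Int) - PySem.Int.mod ((j : Int) * f0) (initial_list.length : Int))) none ++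
      PySem.List.slice initial_list none
        (some ((initial_list.length : Int) - PySem.Int.mod ((j : Int) * f0) (initial_list.length : Int))))
    = initial_list.rotate (j * (initial_list.length - (PySem.Int.mod f0 (initial_list.length : Int)).toNat)) := by
  have hnpos : 0 < initial_list.length := List.length_pos_iff.mpr hn
  set n := initial_list.length with hn_def
  have hnz : (0:Int) < (n : Int) := by exact_mod_cast hnpos
  rw [PySem.Int.mod_eq_emod_of_pos hnz, PySem.Int.mod_eq_emod_of_pos hnz]
  set K : Int := ((j : Int) * f0) % (n : Int) with hK_def
  have hK0 : 0 ≤ K := Int.emod_nonneg _ (by omega)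
  have hKn : K < (n : Int) := Int.emod_lt_of_pos _ hnz
  set F : Int := f0 % (n : Int) with hF_def
  have hF0 : 0 ≤ F := Int.emod_nonneg _ (by omega)
  have hFn : F < (n : Int) := Int.emod_lt_of_pos _ hnz
  rw [PySem.List.slice_from initial_list (show (0:Int) ≤ (n:Int) - K by omega),
      PySem.List.slice_to initial_list (show (0:Int) ≤ (n:Int) - K by omega)]
  have hle : ((n : Int) - K).toNat ≤ n := by omega
  -- both rotation amounts agree mod n
  have hmodeq : (((n : Int) - K).toNat : Int) % (n : Int)
      = ((j * (n - F.toNat) : Nat) : Int) % (n : Int) := by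
    have h1 : (((n : Int) - K).toNat : Int) = (n : Int) - K := by omega
    have hFt : (F.toNat : Int) = F := Int.toNat_of_nonneg hF0
    have h2 : ((j * (n - F.toNat) : Nat) : Int) = (j : Int) * ((n : Int) - F) := by
      push_cast [show F.toNat ≤ n from by omega, hFt]
      ring
    rw [h1, h2]
    have e1 : (n : Int) - K = -((j:Int) * f0) + (n:Int) * (1 + ((j:Int) * f0) / (n:Int)) := by
      rw [hK_def, Int.emod_def]; ring
    have e2 : (j : Int) * ((n : Int) - F) = -((j:Int) * f0) + (n:Int) * ((j:Int) + (j:Int) * (f0 / (n:Int))) := by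
      rw [hF_def, Int.emod_def]; ring
    rw [e1, e2, Int.add_mul_emod_self_left, Int.add_mul_emod_self_left]
  have hnatmod : ((n : Int) - K).toNat % n = (j * (n - F.toNat)) % n := by
    have := hmodeq
    rw [← Int.natCast_emod, ← Int.natCast_emod] at this
    exact_mod_cast this
  calc initial_list.drop ((n:Int) - K).toNat ++ initial_list.take ((n:Int) - K).toNat
      = initial_list.rotate (((n : Int) - K).toNat) := by
        rw [List.rotate_eq_drop_append_take (by rw [← hn_def]; exact hle)]
    _ = initial_list.rotate (((n : Int) - K).toNat % n) := by
        conv_rhs => rw [hn_def, List.rotate_mod]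
    _ = initial_list.rotate ((j * (n - F.toNat)) % n) := by rw [hnatmod]
    _ = initial_list.rotate (j * (n - F.toNat)) := by
        conv_rhs => rw [hn_def, ← List.rotate_mod]

-- ===== VERDICT (by name: the statement is the Claim_ definition above) =====
theorem list_move_spec : Claim_equal_list_move := by
  intro initial_list amount factor _
  unfold Spec_list_move list_move list_move_alt
  by_cases hn : initial_list = []
  · subst hn
    simp
  · have hnpos : 0 < initial_list.length := List.length_pos_iff.mpr hn
    have hne : ((initial_list.length : Int) == 0) = false := by simp; omega
    rw [hne]
    simp only [Bool.false_eq_true, if_false]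
    by_cases ha : amount ≤ 0
    · rw [PySem.List.pyRange_one_eq_nil ha]
      simp
    · replace ha : 0 < amount := by omega
      have hamt : amount = ((amount.toNat : Nat) : Int) := by omega
      have hm1 : 1 ≤ amount.toNat := by omega
      rw [hamt, lm_outer_inv initial_list factor hn amount.toNat hm1]
      rw [PySem.List.pyRange_one 0 _]
      simp only [sub_zero, Int.toNat_natCast, List.map_map, hne, Bool.false_eq_true, if_false]
      apply List.map_congr_left
      intro j _
      simp only [Function.comp_apply, zero_add]
      exact (lm_pointwise initial_list factor hn j).symm
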